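-- pv_equiv track=rewrite | github.com/eddiecong/Leetcodes | python/single_cpu.py | pick_task
-- ===== SOURCE A (Python) =====
-- def pick_task(tasks, time):
--     waiting_list = []
--     for index, task in enumerate(tasks):
--         if time >= task[0]: waiting_list.append((index, task))
--     if not waiting_list: return None, tasks
--
--     picked_item = waiting_list[0]
--     for item in waiting_list:
--         if item[1][1] < picked_item[1][1]: picked_item = item
--     tasks.pop(picked_item[0])
--     return picked_item[1], tasks
-- ===== SOURCE B (Python) =====
-- def pick_task(tasks, time):
--     # Try candidates in order of (processing time, original index); the first
--     # available one in that order is the task A's filter+min-scan would pick.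
--     for index, task in sorted(enumerate(tasks), key=lambda it: (it[1][1], it[0])):
--         if time >= task[0]:
--             tasks.pop(index)
--             return task, tasks
--     return None, tasks
-- ===== Notes on version B (the rewrite author's own statement) =====
-- stated objective: alternative
-- what changed: Replaced the filter-then-min-scan (build a waiting list, then scan it for the minimum processing time) by sorting the enumerated tasks by (processing time, original index) and returning the first available task in that sorted order.
import Mathlib
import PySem

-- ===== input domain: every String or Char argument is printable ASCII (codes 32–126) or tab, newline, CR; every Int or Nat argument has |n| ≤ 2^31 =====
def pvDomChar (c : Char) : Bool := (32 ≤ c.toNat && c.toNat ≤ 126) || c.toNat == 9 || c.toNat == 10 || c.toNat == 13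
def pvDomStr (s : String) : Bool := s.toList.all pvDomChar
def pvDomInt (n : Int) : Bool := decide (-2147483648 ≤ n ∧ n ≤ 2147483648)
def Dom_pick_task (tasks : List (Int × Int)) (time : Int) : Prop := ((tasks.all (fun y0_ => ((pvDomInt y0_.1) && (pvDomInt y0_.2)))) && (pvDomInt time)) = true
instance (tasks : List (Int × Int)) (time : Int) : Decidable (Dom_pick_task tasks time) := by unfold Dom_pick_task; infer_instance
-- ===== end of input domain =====

-- B replaces A's filter-then-min-scan with a different algorithm: sort the enumerated tasks
-- by (processing time, original index) and return the first available one in that order.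
-- Both Pythons mutate `tasks` via pop (the same pop of the same index); the equivalence
-- proved here is about the returned pair (which, in both, contains the post-pop list).

-- ===== PORT A =====
-- loop body of 'if time >= task[0]: waiting_list.append((index, task))'
def aAppendStep (time : Int) (acc : List (Int × (Int × Int))) (it : Int × (Int × Int)) : List (Int × (Int × Int)) :=
  if time ≥ it.2.1 then acc ++ [it] else acc

-- loop body of 'if item[1][1] < picked_item[1][1]: picked_item = item'
def aMinStep (p item : Int × (Int × Int)) : Int × (Int × Int) :=
  if item.2.2 < p.2.2 then item else p

def pick_task (tasks : List (Int × Int)) (time : Int) : (Option (Int × Int)) × (List (Int × Int)) :=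
  let waiting_list := (PySem.List.enumerate tasks).foldl (aAppendStep time) []
  match waiting_list with
  | [] => (none, tasks)
  | w0 :: _ =>
    let picked := waiting_list.foldl aMinStep w0
    match PySem.List.pop? tasks picked.1 with    -- tasks.pop(picked_item[0]); index always in range, none unreachable
    | some (_, rest) => (some picked.2, rest)
    | none => (some picked.2, tasks)

-- ===== PORT B =====
-- 'sorted(enumerate(tasks), key=lambda it: (it[1][1], it[0]))'
def bSorted (tasks : List (Int × Int)) : List (Int × (Int × Int)) :=
  PySem.List.sorted2 (PySem.List.enumerate tasks) (fun it => it.2.2) (fun it => it.1)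

-- the 'for … : if time >= task[0]: tasks.pop(index); return task, tasks' loop with early return
def bScan (tasks : List (Int × Int)) (time : Int) : List (Int × (Int × Int)) → (Option (Int × Int)) × (List (Int × Int))
  | [] => (none, tasks)
  | it :: rest =>
    if time ≥ it.2.1 then
      match PySem.List.pop? tasks it.1 with      -- tasks.pop(index); index always in range, none unreachable
      | some (_, r) => (some it.2, r)
      | none => (some it.2, tasks)
    else bScan tasks time rest

def pick_task_alt (tasks : List (Int × Int)) (time : Int) : (Option (Int × Int)) × (List (Int × Int)) :=
  bScan tasks time (bSorted tasks)

-- ===== PRECONDITION & SPEC =====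
def Spec_pick_task (tasks : List (Int × Int)) (time : Int) (out : (Option (Int × Int)) × (List (Int × Int))) : Prop := out = pick_task_alt tasks time
instance (tasks : List (Int × Int)) (time : Int) (out : (Option (Int × Int)) × (List (Int × Int))) : Decidable (Spec_pick_task tasks time out) := by unfold Spec_pick_task; infer_instance

-- ===== CLAIM (what is proved, stated in full; the proofs are below) =====
def Claim_equal_pick_task : Prop := ∀ (tasks : List (Int × Int)) (time : Int), Dom_pick_task tasks time → Spec_pick_task tasks time (pick_task tasks time)


-- ===== LEMMAS AND PROOFS =====

-- sorted2's comparison for B's key (it[1][1], it[0]), made explicit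
def lexBefore (a b : Int × (Int × Int)) : Bool :=
  decide (a.2.2 < b.2.2) || (!decide (b.2.2 < a.2.2) && decide (a.1 < b.1))

theorem lexBefore_true_iff (a b : Int × (Int × Int)) :
    lexBefore a b = true ↔ a.2.2 < b.2.2 ∨ (¬ b.2.2 < a.2.2 ∧ a.1 < b.1) := by
  simp [lexBefore]

theorem lexBefore_false_iff (a b : Int × (Int × Int)) :
    lexBefore a b = false ↔ b.2.2 ≤ a.2.2 ∧ (b.2.2 < a.2.2 ∨ b.1 ≤ a.1) := by
  simp [lexBefore]; omega

theorem lexBefore_asymm {a b : Int × (Int × Int)} (h : lexBefore a b = true) :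
    lexBefore b a = false := by
  rw [lexBefore_true_iff] at h; rw [lexBefore_false_iff]; omega

theorem lexBefore_negtrans {a b c : Int × (Int × Int)} (h1 : lexBefore a b = true)
    (h2 : lexBefore c b = false) : lexBefore c a = false := by
  rw [lexBefore_true_iff] at h1; rw [lexBefore_false_iff] at h2 ⊢; omega

-- inserting into a list pairwise-ordered by lexBefore keeps it pairwise-ordered
theorem insertBy_lex_pairwise (x : Int × (Int × Int)) (acc : List (Int × (Int × Int)))
    (h : acc.Pairwise (fun a b => lexBefore b a = false)) :
    (PySem.List.insertBy lexBefore x acc).Pairwise (fun a b => lexBefore b a = false) := by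
  induction acc with
  | nil => simp [PySem.List.insertBy]
  | cons y ys ih =>
    rw [List.pairwise_cons] at h
    obtain ⟨hy, hys⟩ := h
    simp only [PySem.List.insertBy]
    by_cases hb : lexBefore x y = true
    · simp only [hb, if_true]
      refine List.Pairwise.cons ?_ (List.Pairwise.cons hy hys)
      intro z hz
      rcases List.mem_cons.mp hz with rfl | hz'
      · exact lexBefore_asymm hb
      · exact lexBefore_negtrans hb (hy z hz')
    · rw [if_neg hb]
      refine List.Pairwise.cons ?_ (ih hys)
      intro z hz
      rcases (PySem.List.mem_insertBy lexBefore x z ys).mp hz with rfl | hz'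
      · exact Bool.eq_false_iff.mpr hb
      · exact hy z hz'

theorem foldl_insertBy_lex_pairwise (l : List (Int × (Int × Int))) (acc : List (Int × (Int × Int)))
    (h : acc.Pairwise (fun a b => lexBefore b a = false)) :
    (l.foldl (fun acc x => PySem.List.insertBy lexBefore x acc) acc).Pairwise
      (fun a b => lexBefore b a = false) := by
  induction l generalizing acc with
  | nil => exact h
  | cons x xs ih => exact ih _ (insertBy_lex_pairwise x acc h)

theorem bSorted_pairwise (tasks : List (Int × Int)) :
    (bSorted tasks).Pairwise (fun a b => lexBefore b a = false) :=
  foldl_insertBy_lex_pairwise _ [] (by simp)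

theorem bSorted_perm (tasks : List (Int × Int)) :
    (bSorted tasks).Perm (PySem.List.enumerate tasks) :=
  PySem.List.sorted2_perm _ _ _ _

-- strictly increasing first components make the first component determine the element
theorem pairwise_fst_inj (l : List (Int × (Int × Int)))
    (h : l.Pairwise (fun a b => a.1 < b.1)) :
    ∀ a ∈ l, ∀ b ∈ l, a.1 = b.1 → a = b := by
  induction l with
  | nil => intro a ha; simp at ha
  | cons x xs ih =>
    rw [List.pairwise_cons] at h
    intro a ha b hb hab
    rcases List.mem_cons.mp ha with rfl | ha' <;> rcases List.mem_cons.mp hb with rfl | hb'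
    · rfl
    · exact absurd hab (by have := h.1 b hb'; omega)
    · exact absurd hab (by have := h.1 a ha'; omega)
    · exact ih h.2 a ha' b hb' hab

-- enumerate has strictly increasing indices
theorem enum_pairwise (tasks : List (Int × Int)) :
    (PySem.List.enumerate tasks).Pairwise (fun a b => a.1 < b.1) := by
  have h := PySem.List.pairwise_lt_pyRange_one 0 (0 + (tasks.length : Int))
  rw [← PySem.List.map_fst_enumerate tasks 0, List.pairwise_map] at h
  exact h

-- A's waiting-list loop builds exactly the filter of the enumerated list.
theorem waiting_eq_filter (time : Int) (l acc : List (Int × (Int × Int))) :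
    l.foldl (aAppendStep time) acc = acc ++ l.filter (fun it => decide (time ≥ it.2.1)) := by
  induction l generalizing acc with
  | nil => simp
  | cons x xs ih =>
    simp only [List.foldl_cons, List.filter_cons, aAppendStep]
    by_cases h : time ≥ x.2.1 <;> simp [h, ih]

-- A's min-scan picks the element with minimal processing time, earliest index on ties.
theorem minscan_spec (l : List (Int × (Int × Int))) (p : Int × (Int × Int))
    (h : (p :: l).Pairwise (fun a b => a.1 < b.1)) :
    l.foldl aMinStep p ∈ p :: l ∧
      ∀ x ∈ p :: l, (l.foldl aMinStep p).2.2 ≤ x.2.2 ∧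
        ((l.foldl aMinStep p).2.2 = x.2.2 → (l.foldl aMinStep p).1 ≤ x.1) := by
  induction l generalizing p with
  | nil =>
    refine ⟨List.mem_singleton.mpr rfl, ?_⟩
    intro x hx; rw [List.mem_singleton] at hx; subst hx
    exact ⟨le_refl _, fun _ => le_refl _⟩
  | cons y ys ih =>
    rw [List.pairwise_cons] at h
    obtain ⟨hp, hrest⟩ := h
    simp only [List.foldl_cons]
    by_cases hc : y.2.2 < p.2.2
    · rw [show aMinStep p y = y by simp [aMinStep, hc]]
      obtain ⟨hm, hmin⟩ := ih y hrest
      refine ⟨List.mem_cons_of_mem _ hm, ?_⟩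
      intro x hx
      rcases List.mem_cons.mp hx with rfl | hx'
      · have h2 := hmin y List.mem_cons_self
        exact ⟨by omega, by omega⟩
      · exact hmin x hx'
    · rw [show aMinStep p y = p by simp [aMinStep, hc]]
      have hrest' := List.pairwise_cons.mp hrest
      have hpw : (p :: ys).Pairwise (fun a b => a.1 < b.1) :=
        List.pairwise_cons.mpr ⟨fun z hz => hp z (List.mem_cons_of_mem _ hz), hrest'.2⟩
      obtain ⟨hm, hmin⟩ := ih p hpw
      refine ⟨?_, ?_⟩
      · rcases List.mem_cons.mp hm with he | hm'
        · rw [he]; exact List.mem_cons_self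
        · exact List.mem_cons_of_mem _ (List.mem_cons_of_mem _ hm')
      · intro x hx
        rcases List.mem_cons.mp hx with rfl | hx'
        · exact hmin _ List.mem_cons_self
        · rcases List.mem_cons.mp hx' with rfl | hx''
          · have hpp := hmin p List.mem_cons_self
            have hpy := hp _ List.mem_cons_self
            refine ⟨by omega, fun htie => ?_⟩
            have h3 := hpp.2 (by omega)
            omega
          · exact hmin x (List.mem_cons_of_mem _ hx'')

-- B's scan over the sorted list finds exactly that element.
theorem bScan_finds (tasks : List (Int × Int)) (time : Int) (m : Int × (Int × Int)) :
    ∀ S : List (Int × (Int × Int)),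
      S.Pairwise (fun a b => lexBefore b a = false) →
      m ∈ S →
      (∀ x ∈ S, x ∈ PySem.List.enumerate tasks) →
      time ≥ m.2.1 →
      (∀ x ∈ S, time ≥ x.2.1 → m.2.2 ≤ x.2.2 ∧ (m.2.2 = x.2.2 → m.1 ≤ x.1)) →
      bScan tasks time S =
        (match PySem.List.pop? tasks m.1 with
         | some (_, r) => (some m.2, r)
         | none => (some m.2, tasks)) := by
  intro S
  induction S with
  | nil => intro _ hm; simp at hm
  | cons it rest ih =>
    intro hpw hm hsub helig hmin
    rw [List.pairwise_cons] at hpw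
    by_cases hc : time ≥ it.2.1
    · -- the head is available: it must be m
      have hit : it = m := by
        rcases List.mem_cons.mp hm with rfl | hm'
        · rfl
        · have h1 := hmin it List.mem_cons_self hc
          have h2 := (lexBefore_false_iff m it).mp (hpw.1 m hm')
          exact pairwise_fst_inj _ (enum_pairwise tasks) it (hsub it List.mem_cons_self)
            m (hsub m hm) (by omega)
      subst hit
      simp only [bScan, if_pos hc]
    · -- the head is unavailable: m is in the tail
      have hm' : m ∈ rest := by
        rcases List.mem_cons.mp hm with rfl | hm'
        · exact absurd helig hc
        · exact hm'
      simp only [bScan, if_neg hc]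
      exact ih hpw.2 hm' (fun x hx => hsub x (List.mem_cons_of_mem _ hx)) helig
        (fun x hx hxe => hmin x (List.mem_cons_of_mem _ hx) hxe)

-- when nothing is available, B's scan falls through to (none, tasks)
theorem bScan_none (tasks : List (Int × Int)) (time : Int) :
    ∀ S : List (Int × (Int × Int)), (∀ x ∈ S, ¬ time ≥ x.2.1) → bScan tasks time S = (none, tasks) := by
  intro S
  induction S with
  | nil => intro _; rfl
  | cons it rest ih =>
    intro h
    simp only [bScan, if_neg (h it List.mem_cons_self)]
    exact ih fun x hx => h x (List.mem_cons_of_mem _ hx)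

-- ===== VERDICT (by name: the statement is the Claim_ definition above) =====
theorem pick_task_spec : Claim_equal_pick_task := by
  intro tasks time _
  unfold Spec_pick_task pick_task pick_task_alt
  rw [waiting_eq_filter]
  simp only [List.nil_append]
  cases hf : (PySem.List.enumerate tasks).filter (fun it => decide (time ≥ it.2.1)) with
  | nil =>
    rw [bScan_none tasks time (bSorted tasks) ?_]
    intro x hx hxe
    have hxE : x ∈ PySem.List.enumerate tasks := (bSorted_perm tasks).mem_iff.mp hx
    have hmem : x ∈ (PySem.List.enumerate tasks).filter (fun it => decide (time ≥ it.2.1)) :=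
      List.mem_filter.mpr ⟨hxE, by simpa using hxe⟩
    rw [hf] at hmem; exact absurd hmem List.not_mem_nil
  | cons w0 rest =>
    dsimp only
    have hFpw : (w0 :: rest).Pairwise (fun a b : Int × (Int × Int) => a.1 < b.1) := by
      rw [← hf]
      exact (enum_pairwise tasks).sublist List.filter_sublist
    have hfold : (w0 :: rest).foldl aMinStep w0 = rest.foldl aMinStep w0 := by
      simp only [List.foldl_cons]
      congr 1
      simp [aMinStep]
    rw [hfold]
    obtain ⟨hm, hmin⟩ := minscan_spec rest w0 hFpw
    set m := rest.foldl aMinStep w0 with hmdef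
    have hmF : m ∈ (PySem.List.enumerate tasks).filter (fun it => decide (time ≥ it.2.1)) := by
      rw [hf]; exact hm
    have hmE : m ∈ PySem.List.enumerate tasks := (List.mem_filter.mp hmF).1
    have hmelig : time ≥ m.2.1 := by
      have := (List.mem_filter.mp hmF).2; simpa using this
    rw [bScan_finds tasks time m (bSorted tasks) (bSorted_pairwise tasks)
      ((bSorted_perm tasks).mem_iff.mpr hmE)
      (fun x hx => (bSorted_perm tasks).mem_iff.mp hx) hmelig ?_]
    · intro x hx hxe
      have hxE : x ∈ PySem.List.enumerate tasks := (bSorted_perm tasks).mem_iff.mp hx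
      have hxF : x ∈ w0 :: rest := by
        rw [← hf]; exact List.mem_filter.mpr ⟨hxE, by simpa using hxe⟩
      exact hmin x hxF
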